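-- pv_equiv track=rewrite | github.com/kimpresidentsk-dev/crowny-rns-server | hanseon.py | _protect_strings
-- ===== SOURCE A (Python) =====
-- def _protect_strings(line):
--     """문자열 리터럴을 플레이스홀더로 대체"""
--     strings = []
--     result = []
--     i = 0
--     in_str = None
--
--     while i < len(line):
--         c = line[i]
--
--         if in_str is None:
--             if c in ('"', "'"):
--                 # 삼중 따옴표 확인
--                 if line[i:i+3] in ('"""', "'''"):
--                     end = line.find(line[i:i+3], i+3)
--                     if end == -1:
--                         strings.append(line[i:])
--                         result.append(f"__STR{len(strings)-1}__")
--                         break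
--                     strings.append(line[i:end+3])
--                     result.append(f"__STR{len(strings)-1}__")
--                     i = end + 3
--                     continue
--                 # 일반 따옴표
--                 in_str = c
--                 start = i
--                 i += 1
--                 continue
--             result.append(c)
--             i += 1
--         else:
--             if c == '\\':
--                 i += 2
--                 continue
--             if c == in_str:
--                 strings.append(line[start:i+1])
--                 result.append(f"__STR{len(strings)-1}__")
--                 in_str = None
--             i += 1
--
--     if in_str is not None:
--         strings.append(line[start:])
--         result.append(f"__STR{len(strings)-1}__")
--
--     return "".join(result), strings
-- ===== SOURCE B (Python) =====
-- def _protect_strings(line):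
--     """문자열 리터럴을 플레이스홀더로 대체"""
--     strings = []
--     out = []
--     rest = line
--     while rest:
--         p1 = rest.find('"')
--         p2 = rest.find("'")
--         if p1 == -1 and p2 == -1:
--             out.append(rest)
--             break
--         if p1 == -1:
--             p, q = p2, "'"
--         elif p2 == -1:
--             p, q = p1, '"'
--         elif p1 < p2:
--             p, q = p1, '"'
--         else:
--             p, q = p2, "'"
--         out.append(rest[:p])
--         lit, rest = _take_literal(rest[p:], q)
--         strings.append(lit)
--         out.append(f"__STR{len(strings)-1}__")
--     return "".join(out), strings
--
--
-- def _take_literal(s, q):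
--     """Return (the literal starting s, the remainder after it)."""
--     if s.startswith(q * 3):
--         e = s.find(q * 3, 3)
--         if e == -1:
--             return s, ""
--         return s[:e + 3], s[e + 3:]
--     j = 1
--     while j < len(s):
--         if s[j] == '\\':
--             j += 2
--         elif s[j] == q:
--             return s[:j + 1], s[j + 1:]
--         else:
--             j += 1
--     return s, ""
-- ===== Notes on version B (the rewrite author's own statement) =====
-- stated objective: alternative
-- what changed: A walks the line one character at a time with an in_str/start state machine; B jumps with str.find to the next quote, emits the quote-free chunk in one piece, and hands the literal to a dedicated helper (_take_literal) that consumes triple-quoted or escaped single/double-quoted literals and returns the remainder, so B has no cross-iteration string state.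
import Mathlib
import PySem

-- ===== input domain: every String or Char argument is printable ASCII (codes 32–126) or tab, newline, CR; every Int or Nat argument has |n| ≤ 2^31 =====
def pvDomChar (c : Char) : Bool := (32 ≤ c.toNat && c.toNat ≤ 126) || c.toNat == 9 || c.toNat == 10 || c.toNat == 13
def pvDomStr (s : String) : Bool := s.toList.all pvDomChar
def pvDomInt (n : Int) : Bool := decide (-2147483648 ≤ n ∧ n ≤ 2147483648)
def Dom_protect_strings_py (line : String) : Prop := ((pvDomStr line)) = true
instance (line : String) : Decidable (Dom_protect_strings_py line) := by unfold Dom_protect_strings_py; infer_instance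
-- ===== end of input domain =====

-- B replaces A's single character-at-a-time state machine by find-driven jumps to the
-- next quote plus a dedicated literal scanner; alternative decomposition, not claimed faster.

-- ===== PORT A =====
def pvPH (n : Int) : List Char :=
  ['_','_','S','T','R'] ++ PySem.Int.toChars n ++ ['_','_']

-- termination helper for aLoop/bLoop (cites findFrom_natCast_spec)
theorem pv_findFrom_lb (ln sub : List Char) (k : Nat) (hk : k ≤ ln.length)
    (h : PySem.Chars.findFrom ln sub (k : Int) ≠ -1) :
    (k : Int) ≤ PySem.Chars.findFrom ln sub (k : Int) :=
  (PySem.Chars.findFrom_natCast_spec ln sub k hk h).1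

def aLoop (ln : List Char) (i : Nat) (inStr : Option Char) (start : Nat)
    (strings res : List (List Char)) : List (List Char) × List (List Char) :=
  if h : i < ln.length then
    let c := ln[i]
    match inStr with
    | none =>
      if c = '"' ∨ c = '\'' then
        let s3 := PySem.List.slice ln (some (i : Int)) (some ((i : Int) + 3))
        if hs3 : s3 = ['"','"','"'] ∨ s3 = ['\'','\'','\''] then
          let e := PySem.Chars.findFrom ln s3 ((i : Int) + 3)
          if he : e = -1 then
            let strings' := strings ++ [PySem.List.slice ln (some (i : Int)) none]
            (res ++ [pvPH ((strings'.length : Int) - 1)], strings')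
          else
            let strings' := strings ++ [PySem.List.slice ln (some (i : Int)) (some (e + 3))]
            aLoop ln (e + 3).toNat none start strings'
              (res ++ [pvPH ((strings'.length : Int) - 1)])
        else
          aLoop ln (i + 1) (some c) i strings res
      else
        aLoop ln (i + 1) none start strings (res ++ [[c]])
    | some q =>
      if c = '\\' then aLoop ln (i + 2) (some q) start strings res
      else if c = q then
        let strings' := strings ++ [PySem.List.slice ln (some (start : Int)) (some ((i : Int) + 1))]
        aLoop ln (i + 1) none start strings' (res ++ [pvPH ((strings'.length : Int) - 1)])
      else aLoop ln (i + 1) (some q) start strings res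
  else
    match inStr with
    | some _ =>
      let strings' := strings ++ [PySem.List.slice ln (some (start : Int)) none]
      (res ++ [pvPH ((strings'.length : Int) - 1)], strings')
    | none => (res, strings)
termination_by ln.length - i
decreasing_by
  · -- triple-quote jump: i < (e+3).toNat
    have h3 : i + 3 ≤ ln.length := by
      have hlen : s3.length = 3 := by rcases hs3 with h' | h' <;> simp [h']
      have hsl : s3 = (ln.drop i).take ((i+3) - i) := by
        simpa using PySem.List.slice_natCast ln i (i+3)
      rw [hsl] at hlen
      simp [List.length_take, List.length_drop] at hlen
      omega
    have hge : ((i : Int) + 3) ≤ PySem.Chars.findFrom ln (PySem.List.slice ln (some (i : Int)) (some ((i : Int) + 3))) ((i : Int) + 3) := by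
      have hh := pv_findFrom_lb ln (PySem.List.slice ln (some (i : Int)) (some ((i : Int) + 3))) (i+3) h3
        (by push_cast; exact he)
      push_cast at hh
      exact hh
    omega
  all_goals omega

def protect_strings_py (line : String) : String × List String :=
  let r := aLoop line.toList 0 none 0 [] []
  (String.ofList (PySem.Chars.join [] r.1), r.2.map String.ofList)

-- ===== PORT B =====
def closeIdx (s : List Char) (q : Char) (j : Nat) : Option Nat :=
  if h : j < s.length then
    if s[j] = '\\' then closeIdx s q (j + 2)
    else if s[j] = q then some j
    else closeIdx s q (j + 1)
  else none
termination_by s.length - j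

theorem closeIdx_lt (s : List Char) (q : Char) (j : Nat) (j' : Nat)
    (h : closeIdx s q j = some j') : j' < s.length := by
  fun_induction closeIdx s q j <;> simp_all <;> omega

def takeLit (s : List Char) (q : Char) : List Char × List Char :=
  if PySem.Chars.startswith s [q, q, q] then
    let e := PySem.Chars.findFrom s [q, q, q] 3
    if e = -1 then (s, [])
    else (PySem.List.slice s none (some (e + 3)), PySem.List.slice s (some (e + 3)) none)
  else
    match closeIdx s q 1 with
    | some j => (PySem.List.slice s none (some ((j : Int) + 1)),
                 PySem.List.slice s (some ((j : Int) + 1)) none)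
    | none => (s, [])

theorem takeLit_snd_lt (s : List Char) (q : Char) (hs : s ≠ []) :
    (takeLit s q).2.length < s.length := by
  have hpos : 0 < s.length := List.length_pos_iff.2 hs
  unfold takeLit
  split
  · next hsw =>
    have h3 : 3 ≤ s.length := by
      have hp := (PySem.Chars.startswith_iff s [q,q,q]).1 hsw
      have := hp.length_le; simpa using this
    by_cases he : PySem.Chars.findFrom s [q,q,q] 3 = -1
    · simp only [he]; simpa using hpos
    · rw [if_neg he]
      have hge : (3 : Int) ≤ PySem.Chars.findFrom s [q,q,q] (3 : Int) := by
        have := pv_findFrom_lb s [q,q,q] 3 h3 (by exact_mod_cast he)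
        exact_mod_cast this
      rw [PySem.List.slice_from _ (by omega)]
      simp only [List.length_drop]
      omega
  · split
    · next j hj =>
      have hjlt : j < s.length := closeIdx_lt s q 1 j hj
      rw [PySem.List.slice_from _ (by positivity)]
      simp only [List.length_drop]; omega
    · simpa using hpos

theorem takeLit_nil (q : Char) : takeLit [] q = ([], []) := by
  have h1 : PySem.Chars.startswith [] [q,q,q] = false := by
    rw [Bool.eq_false_iff]
    intro hc
    have := ((PySem.Chars.startswith_iff _ _).1 hc).length_le
    simp at this
  have h2 : closeIdx [] q 1 = none := by unfold closeIdx; simp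
  unfold takeLit
  rw [h1]
  simp [h2]

def bLoop (rest : List Char) (strings out : List (List Char)) : List (List Char) × List (List Char) :=
  if hrest : rest = [] then (out, strings)
  else
    let p1 := PySem.Chars.find rest ['"']
    let p2 := PySem.Chars.find rest ['\'']
    if hq : p1 = -1 ∧ p2 = -1 then (out ++ [rest], strings)
    else
      let pq : Int × Char :=
        if p1 = -1 then (p2, '\'')
        else if p2 = -1 then (p1, '"')
        else if p1 < p2 then (p1, '"') else (p2, '\'')
      let pre := PySem.List.slice rest none (some pq.1)
      let lr := takeLit (PySem.List.slice rest (some pq.1) none) pq.2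
      let strings' := strings ++ [lr.1]
      bLoop lr.2 strings' (out ++ [pre, pvPH ((strings'.length : Int) - 1)])
termination_by rest.length
decreasing_by
  show lr.2.length < rest.length
  have hp : 0 ≤ pq.1 := by
    have n1 := PySem.Chars.neg_one_le_find rest ['"']
    have n2 := PySem.Chars.neg_one_le_find rest ['\'']
    simp only [pq, p1, p2] at *
    split
    · omega
    · split
      · omega
      · split <;> omega
  have h2 : (PySem.List.slice rest (some pq.1) none).length ≤ rest.length := by
    rw [PySem.List.slice_from _ hp]; simp
  have hpos : 0 < rest.length := List.length_pos_iff.2 hrest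
  by_cases hnil : PySem.List.slice rest (some pq.1) none = []
  · have hz : lr.2 = [] := by simp only [lr, hnil, takeLit_nil]
    rw [hz]; simpa using hpos
  · have h1 : lr.2.length < (PySem.List.slice rest (some pq.1) none).length :=
      takeLit_snd_lt _ _ hnil
    omega

def protect_strings_py_alt (line : String) : String × List String :=
  let r := bLoop line.toList [] []
  (String.ofList (PySem.Chars.join [] r.1), r.2.map String.ofList)

-- ===== PRECONDITION & SPEC =====
def Spec_protect_strings_py (line : String) (out : String × List String) : Prop := out = protect_strings_py_alt line
instance (line : String) (out : String × List String) : Decidable (Spec_protect_strings_py line out) := by unfold Spec_protect_strings_py; infer_instance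

-- ===== CLAIM (what is proved, stated in full; the proofs are below) =====
def Claim_equal_protect_strings_py : Prop := ∀ (line : String), Dom_protect_strings_py line → Spec_protect_strings_py line (protect_strings_py line)

-- ===== LEMMAS AND PROOFS =====
-- the joined text and the strings list of an intermediate state
def pvW (r : List (List Char) × List (List Char)) : List Char × List (List Char) := (r.1.flatten, r.2)

theorem pv_join_nil (ps : List (List Char)) : PySem.Chars.join [] ps = ps.flatten := by
  induction ps with
  | nil => simp [PySem.Chars.join, List.intercalate]
  | cons a t ih =>
    cases t with
    | nil => simp [PySem.Chars.join, List.intercalate]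
    | cons b r => rw [PySem.Chars.join_cons_cons]; simp_all

theorem pv_singleton_infix (x : Char) (l : List Char) : [x] <:+: l ↔ x ∈ l := by
  constructor
  · rintro ⟨s, t2, rfl⟩; simp
  · intro hm
    obtain ⟨s, t2, rfl⟩ := List.append_of_mem hm
    exact ⟨s, t2, by simp⟩

theorem pv_find_head (c : Char) (t : List Char) : PySem.Chars.find (c :: t) [c] = 0 := by
  have hin : [c] <:+: (c :: t) := (pv_singleton_infix _ _).2 (by simp)
  have h0 : 0 ≤ PySem.Chars.find (c :: t) [c] := (PySem.Chars.find_nonneg_iff _ _).2 hin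
  have hs := PySem.Chars.find_spec h0
  rcases Nat.eq_zero_or_pos (PySem.Chars.find (c :: t) [c]).toNat with hz | hp
  · omega
  · have hnp := hs.2 0 hp
    rw [List.drop_zero] at hnp
    exact absurd ⟨t, rfl⟩ hnp

theorem pv_find_cons (c x : Char) (t : List Char) (h : c ≠ x) :
    PySem.Chars.find (c :: t) [x] =
      if PySem.Chars.find t [x] = -1 then -1 else PySem.Chars.find t [x] + 1 := by
  by_cases hf : PySem.Chars.find t [x] = -1
  · rw [if_pos hf]
    rw [PySem.Chars.find_eq_neg_one_iff] at hf ⊢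
    intro hin
    apply hf
    rw [pv_singleton_infix] at hin ⊢
    rcases List.mem_cons.1 hin with h' | h'
    · exact absurd h'.symm h
    · exact h'
  · rw [if_neg hf]
    have hft : 0 ≤ PySem.Chars.find t [x] := by
      have := PySem.Chars.neg_one_le_find t [x]; omega
    have hspt := PySem.Chars.find_spec hft
    have hin : [x] <:+: (c :: t) := by
      rw [pv_singleton_infix]
      have : [x] <:+: t := by
        rw [← PySem.Chars.find_nonneg_iff]; exact hft
      rw [pv_singleton_infix] at this
      exact List.mem_cons_of_mem _ this
    have hg0 : 0 ≤ PySem.Chars.find (c :: t) [x] := (PySem.Chars.find_nonneg_iff _ _).2 hin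
    have hsp := PySem.Chars.find_spec hg0
    set g := PySem.Chars.find (c :: t) [x] with hgdef
    set f := PySem.Chars.find t [x] with hfdef
    have hne0 : g.toNat ≠ 0 := by
      intro h0
      have h1 := hsp.1
      rw [h0, List.drop_zero] at h1
      obtain ⟨r, hr⟩ := h1
      simp at hr
      exact h hr.1.symm
    have hp1 : [x] <+: t.drop (g.toNat - 1) := by
      have h1 := hsp.1
      have : (c :: t).drop g.toNat = t.drop (g.toNat - 1) := by
        obtain ⟨k, hk⟩ : ∃ k, g.toNat = k + 1 := ⟨g.toNat - 1, by omega⟩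
        rw [hk]; simp
      rwa [this] at h1
    have hle1 : f.toNat ≤ g.toNat - 1 := by
      by_contra hcon
      exact hspt.2 (g.toNat - 1) (by omega) hp1
    have hle2 : g.toNat ≤ f.toNat + 1 := by
      by_contra hcon
      exact hsp.2 (f.toNat + 1) (by omega) (by simpa using hspt.1)
    omega

theorem pv_rest_lt (rest : List Char) (hrest : rest ≠ []) (p : Int) (q : Char) (hp : 0 ≤ p) :
    (takeLit (PySem.List.slice rest (some p) none) q).2.length < rest.length := by
  have hpos : 0 < rest.length := List.length_pos_iff.2 hrest
  by_cases hnil : PySem.List.slice rest (some p) none = []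
  · rw [hnil, takeLit_nil]; simpa using hpos
  · have h1 := takeLit_snd_lt _ q hnil
    have h2 : (PySem.List.slice rest (some p) none).length ≤ rest.length := by
      rw [PySem.List.slice_from _ hp]; simp
    omega

theorem pv_bLoop_out (n : Nat) : ∀ (rest : List Char), rest.length ≤ n →
    ∀ (strings out : List (List Char)),
    (bLoop rest strings out).1.flatten = out.flatten ++ (bLoop rest strings []).1.flatten ∧
    (bLoop rest strings out).2 = (bLoop rest strings []).2 := by
  induction n with
  | zero =>
    intro rest hlen strings out
    have hr : rest = [] := by cases rest with | nil => rfl | cons a b => simp at hlen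
    subst hr
    simp [bLoop]
  | succ n ih =>
    intro rest hlen strings out
    by_cases hrest : rest = []
    · subst hrest; simp [bLoop]
    · rw [bLoop, bLoop]
      simp only [dif_neg hrest]
      by_cases hq : PySem.Chars.find rest ['"'] = -1 ∧ PySem.Chars.find rest ['\''] = -1
      · simp only [dif_pos hq]
        simp
      · simp only [dif_neg hq]
        have hp : 0 ≤ (if PySem.Chars.find rest ['"'] = -1 then (PySem.Chars.find rest ['\''], '\'')
              else if PySem.Chars.find rest ['\''] = -1 then (PySem.Chars.find rest ['"'], '"')
              else if PySem.Chars.find rest ['"'] < PySem.Chars.find rest ['\''] then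
                (PySem.Chars.find rest ['"'], '"')
              else (PySem.Chars.find rest ['\''], '\'')).1 := by
          have n1 := PySem.Chars.neg_one_le_find rest ['"']
          have n2 := PySem.Chars.neg_one_le_find rest ['\'']
          split
          · next h' => push Not at hq; omega
          · split
            · omega
            · split <;> omega
        set pq := (if PySem.Chars.find rest ['"'] = -1 then (PySem.Chars.find rest ['\''], '\'')
              else if PySem.Chars.find rest ['\''] = -1 then (PySem.Chars.find rest ['"'], '"')
              else if PySem.Chars.find rest ['"'] < PySem.Chars.find rest ['\''] then
                (PySem.Chars.find rest ['"'], '"')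
              else (PySem.Chars.find rest ['\''], '\'')) with hpq
        have hlt : (takeLit (PySem.List.slice rest (some pq.1) none) pq.2).2.length < rest.length :=
          pv_rest_lt rest hrest pq.1 pq.2 hp
        have iha := ih (takeLit (PySem.List.slice rest (some pq.1) none) pq.2).2 (by omega)
        set X := takeLit (PySem.List.slice rest (some pq.1) none) pq.2 with hX
        have e := iha (strings ++ [X.1])
          (out ++ [PySem.List.slice rest none (some pq.1), pvPH ((↑(strings ++ [X.1]).length : Int) - 1)])
        have f := iha (strings ++ [X.1])
          ([] ++ [PySem.List.slice rest none (some pq.1), pvPH ((↑(strings ++ [X.1]).length : Int) - 1)])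
        constructor
        · rw [e.1, f.1]; simp
        · rw [e.2, f.2]

theorem pv_bLoop_congr (rest : List Char) (strings out out' : List (List Char))
    (h : out.flatten = out'.flatten) :
    pvW (bLoop rest strings out) = pvW (bLoop rest strings out') := by
  have h1 := pv_bLoop_out rest.length rest (by omega) strings out
  have h2 := pv_bLoop_out rest.length rest (by omega) strings out'
  simp [pvW, h1.1, h1.2, h2.1, h2.2, h]

theorem pv_find_nil (x : Char) : PySem.Chars.find [] [x] = -1 := by
  rw [PySem.Chars.find_eq_neg_one_iff, pv_singleton_infix]; simp

theorem pv_bSkip (c : Char) (t : List Char) (strings out : List (List Char))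
    (hc1 : c ≠ '"') (hc2 : c ≠ '\'') :
    pvW (bLoop (c :: t) strings out) = pvW (bLoop t strings (out ++ [[c]])) := by
  have hF1 := pv_find_cons c '"' t hc1
  have hF2 := pv_find_cons c '\'' t hc2
  cases t with
  | nil =>
    rw [bLoop, bLoop]
    simp [pv_find_nil, hF1, hF2]
  | cons b t' =>
    set t := b :: t' with ht
    have htne : t ≠ [] := by simp [ht]
    rw [bLoop, bLoop]
    simp only [dif_neg (by simp : ¬(c :: t = [])), dif_neg htne]
    by_cases hq : PySem.Chars.find t ['"'] = -1 ∧ PySem.Chars.find t ['\''] = -1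
    · have hq' : PySem.Chars.find (c :: t) ['"'] = -1 ∧ PySem.Chars.find (c :: t) ['\''] = -1 := by
        rw [hF1, hF2, if_pos hq.1, if_pos hq.2]; exact ⟨rfl, rfl⟩
      rw [dif_pos hq', dif_pos hq]
      simp [pvW]
    · have n1 := PySem.Chars.neg_one_le_find t ['"']
      have n2 := PySem.Chars.neg_one_le_find t ['\'']
      have hq' : ¬(PySem.Chars.find (c :: t) ['"'] = -1 ∧ PySem.Chars.find (c :: t) ['\''] = -1) := by
        rw [hF1, hF2]
        intro hcon
        apply hq
        constructor
        · by_contra h'; rw [if_neg h'] at hcon; omega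
        · by_contra h'; rw [if_neg h'] at hcon; omega
      rw [dif_neg hq', dif_neg hq]
      -- the selected position/quote pair on c :: t is the one on t shifted by one
      have hpq : (if PySem.Chars.find (c :: t) ['"'] = -1 then (PySem.Chars.find (c :: t) ['\''], '\'')
            else if PySem.Chars.find (c :: t) ['\''] = -1 then (PySem.Chars.find (c :: t) ['"'], '"')
            else if PySem.Chars.find (c :: t) ['"'] < PySem.Chars.find (c :: t) ['\''] then
              (PySem.Chars.find (c :: t) ['"'], '"')
            else (PySem.Chars.find (c :: t) ['\''], '\''))
          = ((if PySem.Chars.find t ['"'] = -1 then (PySem.Chars.find t ['\''], '\'')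
            else if PySem.Chars.find t ['\''] = -1 then (PySem.Chars.find t ['"'], '"')
            else if PySem.Chars.find t ['"'] < PySem.Chars.find t ['\''] then
              (PySem.Chars.find t ['"'], '"')
            else (PySem.Chars.find t ['\''], '\'')).1 + 1,
            (if PySem.Chars.find t ['"'] = -1 then (PySem.Chars.find t ['\''], '\'')
            else if PySem.Chars.find t ['\''] = -1 then (PySem.Chars.find t ['"'], '"')
            else if PySem.Chars.find t ['"'] < PySem.Chars.find t ['\''] then
              (PySem.Chars.find t ['"'], '"')
            else (PySem.Chars.find t ['\''], '\'')).2) := by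
        rw [hF1, hF2]
        by_cases h1 : PySem.Chars.find t ['"'] = -1
        · have h2 : ¬ PySem.Chars.find t ['\''] = -1 := fun h' => hq ⟨h1, h'⟩
          rw [if_pos h1, if_neg h2, if_pos h1]
          simp [h2]
        · by_cases h2 : PySem.Chars.find t ['\''] = -1
          · rw [if_neg h1, if_pos h2, if_neg h1, if_pos h2]
            simp only [if_neg (by omega : ¬(PySem.Chars.find t ['"'] + 1 = -1))]
            simp [h2]
          · rw [if_neg h1, if_neg h2, if_neg h1, if_neg h2]
            simp only [if_neg (by omega : ¬(PySem.Chars.find t ['"'] + 1 = -1)),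
              if_neg (by omega : ¬(PySem.Chars.find t ['\''] + 1 = -1))]
            split_ifs <;> first | rfl | (exfalso; omega)
      rw [hpq]
      set pq := (if PySem.Chars.find t ['"'] = -1 then (PySem.Chars.find t ['\''], '\'')
            else if PySem.Chars.find t ['\''] = -1 then (PySem.Chars.find t ['"'], '"')
            else if PySem.Chars.find t ['"'] < PySem.Chars.find t ['\''] then
              (PySem.Chars.find t ['"'], '"')
            else (PySem.Chars.find t ['\''], '\'')) with hpqdef
      have hp0 : 0 ≤ pq.1 := by
        rw [hpqdef]
        split
        · omega
        · split
          · omega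
          · split <;> omega
      -- slices on c :: t are the slices on t shifted
      have hs1 : PySem.List.slice (c :: t) none (some (pq.1 + 1)) =
          c :: PySem.List.slice t none (some pq.1) := by
        rw [PySem.List.slice_to _ (by omega), PySem.List.slice_to _ hp0]
        have : (pq.1 + 1).toNat = pq.1.toNat + 1 := by omega
        rw [this, List.take_succ_cons]
      have hs2 : PySem.List.slice (c :: t) (some (pq.1 + 1)) none =
          PySem.List.slice t (some pq.1) none := by
        rw [PySem.List.slice_from _ (by omega), PySem.List.slice_from _ hp0]
        have : (pq.1 + 1).toNat = pq.1.toNat + 1 := by omega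
        rw [this, List.drop_succ_cons]
      rw [hs1, hs2]
      apply pv_bLoop_congr
      simp
def pvQ (ln : List Char) (i : Nat) : Prop :=
  ∀ (start : Nat) (strings resA resB : List (List Char)), resA.flatten = resB.flatten →
    pvW (aLoop ln i none start strings resA) = pvW (bLoop (ln.drop i) strings resB)

def pvN (ln : List Char) (i : Nat) : Prop :=
  ∀ (q : Char) (start : Nat) (strings resA resB : List (List Char)),
    start < i → start ≤ ln.length → resA.flatten = resB.flatten →
    pvW (aLoop ln i (some q) start strings resA) =
      (match closeIdx (ln.drop start) q (i - start) with
       | some j' => pvW (bLoop (ln.drop (start + j' + 1))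
           (strings ++ [(ln.drop start).take (j' + 1)]) (resB ++ [pvPH (strings.length : Int)]))
       | none => ((resB ++ [pvPH (strings.length : Int)]).flatten, strings ++ [ln.drop start]))

theorem pv_base (ln : List Char) (i : Nat) (hge : ln.length ≤ i) : pvQ ln i ∧ pvN ln i := by
  have hdrop : ln.drop i = [] := by
    apply List.drop_eq_nil_of_le; omega
  constructor
  · intro start strings resA resB hflat
    rw [hdrop, aLoop, bLoop]
    simp only [dif_neg (by omega : ¬ i < ln.length), dif_pos rfl]
    simp [pvW, hflat]
  · intro q start strings resA resB hsi hsl hflat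
    have hcl : closeIdx (ln.drop start) q (i - start) = none := by
      rw [closeIdx]
      have : ¬ (i - start) < (ln.drop start).length := by simp; omega
      simp only [dif_neg this]
    rw [hcl]
    rw [aLoop]
    simp only [dif_neg (by omega : ¬ i < ln.length)]
    rw [PySem.List.slice_from _ (by omega : (0:Int) ≤ (start:Nat))]
    simp [pvW, hflat]

theorem pv_stepN (ln : List Char) (n i : Nat) (h : i < ln.length) (hle : ln.length - i ≤ n + 1)
    (ih : ∀ j, ln.length - j ≤ n → pvQ ln j ∧ pvN ln j) : pvN ln i := by
  intro q start strings resA resB hsi hsl hflat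
  have hjlt : i - start < (ln.drop start).length := by simp; omega
  have hcc : (ln.drop start)[i - start]'hjlt = ln[i]'h := by
    rw [List.getElem_drop]
    congr 1
    omega
  have hstep : closeIdx (ln.drop start) q (i - start) =
      (if ln[i]'h = '\\' then closeIdx (ln.drop start) q (i - start + 2)
       else if ln[i]'h = q then some (i - start)
       else closeIdx (ln.drop start) q (i - start + 1)) := by
    rw [closeIdx]
    simp only [dif_pos hjlt, hcc]
  rw [aLoop]
  simp only [dif_pos h]
  by_cases hbs : ln[i]'h = '\\'
  · simp only [if_pos hbs]
    rw [hstep, if_pos hbs]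
    have h2 : i - start + 2 = (i + 2) - start := by omega
    rw [h2]
    exact (ih (i + 2) (by omega)).2 q start strings resA resB (by omega) hsl hflat
  · by_cases hq' : ln[i]'h = q
    · simp only [if_neg hbs, if_pos hq']
      rw [hstep, if_neg hbs, if_pos hq']
      have e1 : start + (i - start) + 1 = i + 1 := by omega
      have e2 : PySem.List.slice ln (some (start : Int)) (some ((i : Int) + 1)) =
          (ln.drop start).take (i - start + 1) := by
        have := PySem.List.slice_natCast ln start (i + 1)
        push_cast at this
        rw [this]
        congr 1
        omega
      dsimp only
      rw [e1, ← e2]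
      exact (ih (i + 1) (by omega)).1 start
        (strings ++ [PySem.List.slice ln (some (start : Int)) (some ((i : Int) + 1))])
        (resA ++ [pvPH (((strings ++ [PySem.List.slice ln (some (start : Int)) (some ((i : Int) + 1))]).length : Int) - 1)])
        (resB ++ [pvPH (strings.length : Int)])
        (by simp [hflat])
    · simp only [if_neg hbs, if_neg hq']
      rw [hstep, if_neg hbs, if_neg hq']
      have h1 : i - start + 1 = (i + 1) - start := by omega
      rw [h1]
      exact (ih (i + 1) (by omega)).2 q start strings resA resB (by omega) hsl hflat

theorem pv_find_zero (l : List Char) (x : Char) (hf : PySem.Chars.find l [x] = 0) :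
    l.head? = some x := by
  have h0 : 0 ≤ PySem.Chars.find l [x] := by omega
  have hs := (PySem.Chars.find_spec h0).1
  rw [hf] at hs
  obtain ⟨r, hr⟩ := hs
  simp only [Int.toNat_zero, List.drop_zero] at hr
  rw [← hr]
  rfl

theorem pv_stepQ (ln : List Char) (n i : Nat) (h : i < ln.length) (hle : ln.length - i ≤ n + 1)
    (ih : ∀ j, ln.length - j ≤ n → pvQ ln j ∧ pvN ln j) : pvQ ln i := by
  intro start strings resA resB hflat
  have hrest : ln.drop i = ln[i]'h :: ln.drop (i + 1) := List.drop_eq_getElem_cons h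
  rw [aLoop]
  simp only [dif_pos h]
  by_cases hquote : ln[i]'h = '"' ∨ ln[i]'h = '\''
  case neg =>
    push Not at hquote
    simp only [if_neg (show ¬(ln[i]'h = '"' ∨ ln[i]'h = '\'') by push Not; exact hquote)]
    rw [hrest, pv_bSkip _ _ _ _ hquote.1 hquote.2]
    exact (ih (i + 1) (by omega)).1 start strings (resA ++ [[ln[i]'h]]) (resB ++ [[ln[i]'h]])
      (by simp [hflat])
  case pos =>
    simp only [if_pos hquote]
    have hs3eq : PySem.List.slice ln (some (i : Int)) (some ((i : Int) + 3)) = (ln.drop i).take 3 := by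
      have hsl := PySem.List.slice_natCast ln i (i + 3)
      push_cast at hsl
      rw [hsl]
      congr 1
      omega
    have hbne : ln.drop i ≠ [] := by rw [hrest]; exact List.cons_ne_nil _ _
    have hfc : PySem.Chars.find (ln.drop i) [ln[i]'h] = 0 := by
      rw [hrest]; exact pv_find_head _ _
    have hn1 := PySem.Chars.neg_one_le_find (ln.drop i) ['"']
    have hn2 := PySem.Chars.neg_one_le_find (ln.drop i) ['\'']
    have hq12 : ¬ (PySem.Chars.find (ln.drop i) ['"'] = -1 ∧
        PySem.Chars.find (ln.drop i) ['\''] = -1) := by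
      rcases hquote with hc | hc <;> rw [hc] at hfc <;> intro hcon <;> omega
    have hpq : (if PySem.Chars.find (ln.drop i) ['"'] = -1 then (PySem.Chars.find (ln.drop i) ['\''], '\'')
          else if PySem.Chars.find (ln.drop i) ['\''] = -1 then (PySem.Chars.find (ln.drop i) ['"'], '"')
          else if PySem.Chars.find (ln.drop i) ['"'] < PySem.Chars.find (ln.drop i) ['\''] then
            (PySem.Chars.find (ln.drop i) ['"'], '"')
          else (PySem.Chars.find (ln.drop i) ['\''], '\'')) = ((0 : Int), ln[i]'h) := by
      rcases hquote with hc | hc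
      · rw [hc] at hfc ⊢
        rw [hfc]
        by_cases h2 : PySem.Chars.find (ln.drop i) ['\''] = -1
        · rw [if_neg (by norm_num), if_pos h2]
        · rw [if_neg (by norm_num), if_neg h2]
          by_cases h3 : (0 : Int) < PySem.Chars.find (ln.drop i) ['\'']
          · rw [if_pos h3]
          · exfalso
            have hz : PySem.Chars.find (ln.drop i) ['\''] = 0 := by omega
            have hh := pv_find_zero _ _ hz
            rw [hrest] at hh
            simp only [List.head?_cons] at hh
            rw [hc] at hh
            simp at hh
      · rw [hc] at hfc ⊢
        rw [hfc]
        by_cases h1 : PySem.Chars.find (ln.drop i) ['"'] = -1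
        · rw [if_pos h1]
        · rw [if_neg h1, if_neg (by norm_num)]
          rw [if_neg (show ¬ (PySem.Chars.find (ln.drop i) ['"'] < (0 : Int)) by omega)]
    rw [bLoop, dif_neg hbne, dif_neg hq12]
    dsimp only
    rw [hpq]
    dsimp only
    rw [show PySem.List.slice (ln.drop i) none (some (0 : Int)) = [] from by
      rw [PySem.List.slice_to _ le_rfl]; simp]
    rw [show PySem.List.slice (ln.drop i) (some (0 : Int)) none = ln.drop i from by
      rw [PySem.List.slice_from _ le_rfl]; simp]
    by_cases htr : PySem.List.slice ln (some (i : Int)) (some ((i : Int) + 3)) = ['"','"','"'] ∨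
        PySem.List.slice ln (some (i : Int)) (some ((i : Int) + 3)) = ['\'','\'','\'']
    · -- ===== triple-quoted literal =====
      have hcc3 : (ln.drop i).take 3 = [ln[i]'h, ln[i]'h, ln[i]'h] := by
        rcases htr with h' | h'
        · rw [hs3eq, hrest, List.take_succ_cons] at h'
          obtain ⟨hch, htail⟩ := List.cons_eq_cons.mp h'
          rw [hrest, List.take_succ_cons, hch, htail]
        · rw [hs3eq, hrest, List.take_succ_cons] at h'
          obtain ⟨hch, htail⟩ := List.cons_eq_cons.mp h'
          rw [hrest, List.take_succ_cons, hch, htail]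
      have h3len : 3 ≤ (ln.drop i).length := by
        have hl := congrArg List.length hcc3
        simp only [List.length_take, List.length_cons, List.length_nil] at hl
        omega
      have hi3 : i + 3 ≤ ln.length := by
        simp only [List.length_drop] at h3len
        omega
      have hdd : (ln.drop i).drop 3 = ln.drop (i + 3) := by
        rw [List.drop_drop]
      have hsw : PySem.Chars.startswith (ln.drop i) [ln[i]'h, ln[i]'h, ln[i]'h] = true := by
        rw [PySem.Chars.startswith_iff, ← hcc3]
        exact List.take_prefix 3 _
      rw [dif_pos htr]
      have hFA := PySem.Chars.findFrom_natCast ln ([ln[i]'h, ln[i]'h, ln[i]'h]) (i + 3) hi3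
      push_cast at hFA
      have hFB := PySem.Chars.findFrom_natCast (ln.drop i) ([ln[i]'h, ln[i]'h, ln[i]'h]) 3 h3len
      rw [hdd] at hFB
      push_cast at hFB
      have hf1 := PySem.Chars.neg_one_le_find (ln.drop (i + 3)) [ln[i]'h, ln[i]'h, ln[i]'h]
      rw [hs3eq, hcc3]
      rw [takeLit, if_pos hsw]
      dsimp only
      by_cases hfneg : PySem.Chars.find (ln.drop (i + 3)) [ln[i]'h, ln[i]'h, ln[i]'h] = -1
      · rw [hfneg] at hFA hFB
        norm_num at hFA hFB
        rw [hFA, dif_pos rfl, hFB, if_pos rfl]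
        rw [bLoop, dif_pos rfl]
        rw [PySem.List.slice_from _ (by positivity : (0:Int) ≤ (i:Nat))]
        simp only [Int.toNat_natCast]
        simp [pvW, hflat]
      · rw [if_neg hfneg] at hFA hFB
        rw [hFA, hFB]
        rw [dif_neg (show ¬ ((i : Int) + 3 + PySem.Chars.find (ln.drop (i + 3)) [ln[i]'h, ln[i]'h, ln[i]'h] = -1) by omega)]
        rw [if_neg (show ¬ ((3 : Int) + PySem.Chars.find (ln.drop (i + 3)) [ln[i]'h, ln[i]'h, ln[i]'h] = -1) by omega)]
        set f := PySem.Chars.find (ln.drop (i + 3)) [ln[i]'h, ln[i]'h, ln[i]'h] with hfdef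
        have ht1 : ((i : Int) + 3 + f + 3).toNat = i + f.toNat + 6 := by omega
        have ht2 : PySem.List.slice ln (some (i : Int)) (some ((i : Int) + 3 + f + 3)) =
            (ln.drop i).take (f.toNat + 6) := by
          have hcast : ((i : Int) + 3 + f + 3) = ((i + f.toNat + 6 : Nat) : Int) := by push_cast; omega
          rw [hcast]
          rw [PySem.List.slice_natCast]
          congr 1
          omega
        have ht3 : PySem.List.slice (ln.drop i) none (some ((3 : Int) + f + 3)) =
            (ln.drop i).take (f.toNat + 6) := by
          rw [PySem.List.slice_to _ (by omega)]
          congr 1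
          omega
        have ht4 : PySem.List.slice (ln.drop i) (some ((3 : Int) + f + 3)) none =
            ln.drop (i + f.toNat + 6) := by
          rw [PySem.List.slice_from _ (by omega)]
          rw [List.drop_drop]
          congr 1
          omega
        rw [ht1, ht2, ht3, ht4]
        exact (ih (i + f.toNat + 6) (by omega)).1 start
          (strings ++ [(ln.drop i).take (f.toNat + 6)])
          _ _ (by simp [hflat])
    · -- ===== ordinary quoted literal =====
      rw [dif_neg htr]
      have hN := (ih (i + 1) (by omega)).2 (ln[i]'h) i strings resA (resB ++ [[]])
        (by omega) (by omega) (by simp [hflat])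
      rw [hN, show (i + 1) - i = 1 from by omega]
      have hsw : PySem.Chars.startswith (ln.drop i) [ln[i]'h, ln[i]'h, ln[i]'h] = false := by
        rw [Bool.eq_false_iff]
        intro hcon
        obtain ⟨r, hr⟩ := (PySem.Chars.startswith_iff _ _).1 hcon
        have htk : (ln.drop i).take 3 = [ln[i]'h, ln[i]'h, ln[i]'h] := by
          rw [← hr]
          simp
        apply htr
        rcases hquote with hc | hc
        · left; rw [hs3eq, htk, hc]
        · right; rw [hs3eq, htk, hc]
      rw [takeLit, if_neg (by simp [hsw])]
      rcases hci : closeIdx (ln.drop i) (ln[i]'h) 1 with _ | j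
      · dsimp only
        rw [bLoop, dif_pos rfl]
        simp [pvW, hflat]
      · dsimp only
        have hu1 : PySem.List.slice (ln.drop i) none (some ((j : Int) + 1)) =
            (ln.drop i).take (j + 1) := by
          rw [PySem.List.slice_to _ (by omega)]
          congr 1
        have hu2 : PySem.List.slice (ln.drop i) (some ((j : Int) + 1)) none =
            ln.drop (i + j + 1) := by
          rw [PySem.List.slice_from _ (by omega)]
          rw [List.drop_drop]
          congr 1
        rw [hu1, hu2]
        apply pv_bLoop_congr
        simp

theorem pv_master (ln : List Char) : ∀ (n i : Nat), ln.length - i ≤ n → pvQ ln i ∧ pvN ln i := by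
  intro n
  induction n with
  | zero => intro i hle; exact pv_base ln i (by omega)
  | succ n ih =>
    intro i hle
    by_cases h : i < ln.length
    · exact ⟨pv_stepQ ln n i h hle ih, pv_stepN ln n i h hle ih⟩
    · exact pv_base ln i (by omega)

-- ===== VERDICT (by name: the statement is the Claim_ definition above) =====
theorem protect_strings_py_spec : Claim_equal_protect_strings_py := by
  unfold Claim_equal_protect_strings_py
  intro line _
  unfold Spec_protect_strings_py protect_strings_py protect_strings_py_alt
  have h := ((pv_master line.toList line.toList.length 0 (by omega)).1 0 [] [] [] rfl)
  simp only [List.drop_zero] at h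
  simp only [pvW, Prod.mk.injEq] at h
  obtain ⟨h1, h2⟩ := h
  dsimp only
  rw [pv_join_nil, pv_join_nil, h1, h2]
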